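-- pv_equiv track=rewrite | github.com/renukatondihal754/hangman-game | wrappers.py | getDashedWord
-- ===== SOURCE A (Python) =====
-- GIVEN=['c','h']
--
-- def getDashedWord(word):
--     res=''
--     for letter in word:
--         if letter in GIVEN:
--             res+=letter
--
--         else:
--             res+='-'
--
--     return res
-- ===== SOURCE B (Python) =====
-- import re
--
-- GIVEN = ['c', 'h']
-- _PATTERN = re.compile('[^' + ''.join(GIVEN) + ']')
--
-- def getDashedWord(word):
--     return _PATTERN.sub('-', word)
-- ===== Notes on version B (the rewrite author's own statement) =====
-- stated objective: idiomatic
-- what changed: Replaced the explicit character loop with string accumulation by a single precompiled regex substitution that replaces every character outside GIVEN with a dash.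
import Mathlib
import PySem

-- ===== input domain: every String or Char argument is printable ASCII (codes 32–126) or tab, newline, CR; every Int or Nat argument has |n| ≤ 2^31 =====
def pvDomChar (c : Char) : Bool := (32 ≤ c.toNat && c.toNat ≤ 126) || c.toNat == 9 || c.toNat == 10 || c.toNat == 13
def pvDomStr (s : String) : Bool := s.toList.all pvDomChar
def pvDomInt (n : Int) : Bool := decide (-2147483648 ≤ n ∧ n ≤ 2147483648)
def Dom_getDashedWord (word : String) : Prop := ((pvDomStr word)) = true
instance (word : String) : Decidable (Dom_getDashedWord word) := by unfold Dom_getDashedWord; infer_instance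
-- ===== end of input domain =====

-- ===== PORT A =====
-- B replaces the explicit loop with a single regex substitution ('[^ch]' -> '-'); same return value.
def getDashedWord (word : String) : String :=
  word.toList.foldl
    (fun res letter =>
      if letter = 'c' ∨ letter = 'h' then res ++ letter.toString else res ++ "-") ""

-- ===== PORT B =====
-- re.sub('[^ch]', '-', word): each character outside {c,h} becomes '-'
def getDashedWord_alt (word : String) : String :=
  String.ofList (word.toList.map (fun c => if c = 'c' ∨ c = 'h' then c else '-'))

-- ===== PRECONDITION & SPEC =====
def Spec_getDashedWord (word : String) (out : String) : Prop := out = getDashedWord_alt word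
instance (word : String) (out : String) : Decidable (Spec_getDashedWord word out) := by unfold Spec_getDashedWord; infer_instance

-- ===== CLAIM (what is proved, stated in full; the proofs are below) =====
def Claim_equal_getDashedWord : Prop := ∀ (word : String), Dom_getDashedWord word → Spec_getDashedWord word (getDashedWord word)

-- ===== LEMMAS AND PROOFS =====

-- ===== VERDICT (by name: the statement is the Claim_ definition above) =====
theorem getDashedWord_loop (l : List Char) (acc : String) :
    l.foldl
      (fun res letter =>
        if letter = 'c' ∨ letter = 'h' then res ++ letter.toString else res ++ "-") acc
    = acc ++ String.ofList (l.map (fun c => if c = 'c' ∨ c = 'h' then c else '-')) := by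
  induction l generalizing acc with
  | nil => simp
  | cons c t ih =>
    simp only [List.foldl_cons, List.map_cons, ih]
    by_cases h : c = 'c' ∨ c = 'h' <;>
      simp [h, String.ext_iff, Char.toString]

theorem getDashedWord_spec : Claim_equal_getDashedWord := by
  intro word _
  unfold Spec_getDashedWord getDashedWord getDashedWord_alt
  simpa using getDashedWord_loop word.toList ""
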